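-- pv_equiv track=rewrite | github.com/LuisHenrique01/Questoes_Fabio | vetor_utils.py | elementos_repetidos
-- ===== SOURCE A (Python) =====
-- def transferir_elemento(vetor_a, vetor_b):
--     if len(vetor_a) > len(vetor_b):
--         menor = len(vetor_b)
--     else:
--         menor = len(vetor_a)
--     for i in range(menor):
--         a = vetor_a[i]
--         vetor_b[i] = a
--     return vetor_b
--
-- def criar_vetor(tamanho_linha):
--     return [0] * tamanho_linha
--
-- def add_apos_utimo(vetor, elemento):
--     new_vetor = criar_vetor(len(vetor)+1)
--     transferir_elemento(vetor, new_vetor)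
--     new_vetor[len(new_vetor)-1] = elemento
--     return new_vetor
--
-- def elementos_repetidos(vetor):
--     vetor_rep = []
--     cont = 0
--     index = 0
--     for i in range(len(vetor)):
--         for j in range(len(vetor)):
--             if vetor[i] == vetor[j] and i != j:
--                 vetor_rep = add_apos_utimo(vetor_rep, vetor[i])
--                 cont += 1
--     return vetor_rep
-- ===== SOURCE B (Python) =====
-- def elementos_repetidos(vetor):
--     cont = {}
--     for x in vetor:
--         cont[x] = cont.get(x, 0) + 1
--     vetor_rep = []
--     for x in vetor:
--         vetor_rep += [x] * (cont[x] - 1)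
--     return vetor_rep
-- ===== Notes on version B (the rewrite author's own statement) =====
-- stated objective: faster
-- what changed: Replaces the quadratic nested index rescan (with a copy-everything append helper) by one counting pass into a dict followed by one emit pass appending (count[x]-1) copies per occurrence.
import Mathlib
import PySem

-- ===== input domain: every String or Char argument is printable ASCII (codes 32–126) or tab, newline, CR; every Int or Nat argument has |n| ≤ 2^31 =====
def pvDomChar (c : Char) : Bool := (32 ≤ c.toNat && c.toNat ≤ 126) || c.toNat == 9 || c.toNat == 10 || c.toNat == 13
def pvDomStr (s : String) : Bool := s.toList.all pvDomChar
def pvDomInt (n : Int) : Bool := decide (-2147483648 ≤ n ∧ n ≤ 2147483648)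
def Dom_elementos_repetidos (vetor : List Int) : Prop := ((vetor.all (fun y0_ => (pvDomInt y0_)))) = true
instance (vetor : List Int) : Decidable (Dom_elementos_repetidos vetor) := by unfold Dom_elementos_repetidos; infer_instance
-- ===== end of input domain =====

-- B replaces A's nested O(n^2) rescan with copy-on-append by one counting pass into a dict
-- plus one emit pass appending (count[x]-1) copies per occurrence; same return value.

-- ===== PORT A =====
def criar_vetor (tamanho_linha : Int) : List Int :=
  List.replicate tamanho_linha.toNat 0   -- [0] * tamanho_linha ([] for negative, as in Python)

def transferir_elemento (vetor_a vetor_b : List Int) : List Int :=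
  let menor : Int :=
    if (vetor_a.length : Int) > (vetor_b.length : Int) then (vetor_b.length : Int)
    else (vetor_a.length : Int)
  -- i runs over 0 ≤ i < menor ≤ both lengths, so pyGetD and List.set are exact here
  (PySem.List.pyRange 0 menor).foldl
    (fun vb i => vb.set i.toNat (PySem.List.pyGetD vetor_a i 0)) vetor_b

def add_apos_utimo (vetor : List Int) (elemento : Int) : List Int :=
  let new_vetor := criar_vetor ((vetor.length : Int) + 1)
  let new_vetor := transferir_elemento vetor new_vetor
  new_vetor.set ((new_vetor.length : Int) - 1).toNat elemento  -- index len-1 ≥ 0: exact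

def elementos_repetidos (vetor : List Int) : List Int :=
  -- 'cont' and 'index' in the Python are written but never read; the fold keeps only vetor_rep
  (PySem.List.pyRange 0 (vetor.length : Int)).foldl (fun vetor_rep i =>
    (PySem.List.pyRange 0 (vetor.length : Int)).foldl (fun vetor_rep j =>
      if PySem.List.pyGetD vetor i 0 = PySem.List.pyGetD vetor j 0 ∧ i ≠ j then
        add_apos_utimo vetor_rep (PySem.List.pyGetD vetor i 0)
      else vetor_rep) vetor_rep) []

-- ===== PORT B =====
def elementos_repetidos_alt (vetor : List Int) : List Int :=
  let cont : PySem.Dict Int Int :=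
    vetor.foldl (fun d x => d.insert x (d.getD x 0 + 1)) PySem.Dict.empty
  vetor.foldl (fun vetor_rep x =>
    vetor_rep ++ List.replicate (cont.getD x 0 - 1).toNat x) []

-- ===== PRECONDITION & SPEC =====
def Spec_elementos_repetidos (vetor : List Int) (out : List Int) : Prop := out = elementos_repetidos_alt vetor
instance (vetor : List Int) (out : List Int) : Decidable (Spec_elementos_repetidos vetor out) := by unfold Spec_elementos_repetidos; infer_instance

-- ===== CLAIM (what is proved, stated in full; the proofs are below) =====
def Claim_equal_elementos_repetidos : Prop := ∀ (vetor : List Int), Dom_elementos_repetidos vetor → Spec_elementos_repetidos vetor (elementos_repetidos vetor)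

-- ===== LEMMAS AND PROOFS =====

-- the copy loop of transferir_elemento, unrolled index by index
theorem transferir_fold (v : List Int) (k : Nat) (hk : k ≤ v.length) (b : List Int)
    (hb : v.length ≤ b.length) :
    (List.range k).foldl (fun vb i => vb.set i (v.getD i 0)) b
      = v.take k ++ b.drop k := by
  induction k with
  | zero => simp
  | succ k ih =>
    rw [List.range_succ, List.foldl_append, ih (by omega)]
    simp only [List.foldl_cons, List.foldl_nil]
    have hkv : k < v.length := by omega
    have hkb : k < b.length := by omega
    apply List.ext_getElem
    · simp; omega
    · intro i h1 h2
      rcases Nat.lt_trichotomy i k with h | h | h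
      · rw [List.getElem_set_ne (by omega)]
        rw [List.getElem_append_left (by simp; omega),
            List.getElem_append_left (by simp; omega)]
        simp
      · subst h
        rw [List.getElem_set_self]
        · rw [List.getElem_append_left (by simp; omega)]
          simp [List.getD_eq_getElem?_getD, hkv]
      · rw [List.getElem_set_ne (by omega)]
        rw [List.getElem_append_right (by simp; omega),
            List.getElem_append_right (by simp; omega)]
        simp only [List.length_take, List.getElem_drop]
        congr 1
        omega

theorem add_apos_eq (v : List Int) (e : Int) : add_apos_utimo v e = v ++ [e] := by
  unfold add_apos_utimo criar_vetor transferir_elemento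
  have hlen : ((v.length : Int) + 1).toNat = v.length + 1 := by omega
  simp only [hlen, List.length_replicate]
  have hif : ¬ ((v.length : Int) > ((v.length + 1 : Nat) : Int)) := by push_cast; omega
  rw [if_neg hif]
  rw [PySem.List.pyRange_zero_natCast, List.foldl_map]
  have hcongr : (List.range v.length).foldl
      (fun vb (i : Nat) => vb.set ((i : Int)).toNat (PySem.List.pyGetD v (i : Int) 0))
      (List.replicate (v.length + 1) 0)
      = (List.range v.length).foldl (fun vb i => vb.set i (v.getD i 0))
        (List.replicate (v.length + 1) 0) := by
    apply PySem.List.foldl_congr_mem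
    intro acc i _
    rw [PySem.List.pyGetD_natCast]
    simp
  rw [hcongr, transferir_fold v v.length le_rfl _ (by simp)]
  simp only [List.take_length, List.drop_replicate]
  have : v.length + 1 - v.length = 1 := by omega
  rw [this]
  have hlen2 : (v ++ List.replicate 1 (0:Int)).length = v.length + 1 := by simp
  rw [hlen2]
  have : (((v.length + 1 : Nat) : Int) - 1).toNat = v.length := by omega
  rw [this]
  apply List.ext_getElem
  · simp
  · intro i h1 h2
    rcases Nat.lt_trichotomy i v.length with h | h | h
    · rw [List.getElem_set_ne (by omega)]
      rw [List.getElem_append_left (by omega), List.getElem_append_left (by omega)]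
    · subst h
      rw [List.getElem_set_self]
      · rw [List.getElem_append_right (by omega)]
        simp
  -- last case impossible
    · exfalso; simp at h2; omega

-- the index-indirect fold over range is the fold over the list itself
theorem foldl_range_getD {β : Type} (v : List Int) (f : β → Int → β) (a : β) :
    (List.range v.length).foldl (fun acc i => f acc (v.getD i 0)) a = v.foldl f a := by
  have hmap : (List.range v.length).map (fun i => v.getD i 0) = v := by
    apply List.ext_getElem
    · simp
    · intro i h1 h2
      simp [List.getD_eq_getElem?_getD, h2]
  conv_rhs => rw [← hmap]
  rw [List.foldl_map]

-- counting the partners of index i: all positions holding v[i], minus i itself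
theorem countP_partners (v : List Int) (i : Nat) (hi : i < v.length) :
    (List.range v.length).countP
        (fun j => decide (v.getD i 0 = v.getD j 0 ∧ i ≠ j))
      = v.count (v.getD i 0) - 1 := by
  have hmap : (List.range v.length).map (fun j => v.getD j 0) = v := by
    apply List.ext_getElem
    · simp
    · intro j h1 h2
      simp [List.getD_eq_getElem?_getD, h2]
  have hall : ∀ x : Int, (List.range v.length).countP (fun j => decide (x = v.getD j 0))
      = v.count x := by
    intro x
    rw [List.count]
    conv_rhs => rw [← hmap]
    rw [List.countP_map]
    apply List.countP_congr
    intro j _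
    simp only [Function.comp_apply, beq_iff_eq, decide_eq_true_eq]
    exact eq_comm
  have hsplit := List.countP_eq_countP_filter_add (List.range v.length)
      (fun j => decide (v.getD i 0 = v.getD j 0)) (fun j => decide (i = j))
  rw [List.countP_filter, List.countP_filter] at hsplit
  have h1 : (List.range v.length).countP
      (fun a => decide (v.getD i 0 = v.getD a 0) && decide (i = a)) = 1 := by
    have hc : (List.range v.length).countP
        (fun a => decide (v.getD i 0 = v.getD a 0) && decide (i = a))
        = (List.range v.length).countP (fun a => a == i) := by
      apply List.countP_congr
      intro j _
      simp only [Bool.and_eq_true, decide_eq_true_eq, beq_iff_eq]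
      constructor
      · rintro ⟨_, h⟩; exact h.symm
      · rintro rfl; exact ⟨rfl, rfl⟩
    rw [hc, ← List.count, List.count_range, if_pos hi]
  have h2 : (List.range v.length).countP
      (fun j => decide (v.getD i 0 = v.getD j 0 ∧ i ≠ j))
      = (List.range v.length).countP
        (fun a => decide (v.getD i 0 = v.getD a 0) && !decide (i = a)) := by
    apply List.countP_congr
    intro j _
    simp
  have hall' := hall (v.getD i 0)
  omega

-- one outer-loop iteration of A: the inner j-scan appends (count-1) copies of v[i]
theorem inner_eq (v : List Int) (i : Nat) (hi : i < v.length) (acc : List Int) :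
    (PySem.List.pyRange 0 (v.length : Int)).foldl
      (fun vr j => if PySem.List.pyGetD v (i : Int) 0 = PySem.List.pyGetD v j 0 ∧ (i : Int) ≠ j
        then add_apos_utimo vr (PySem.List.pyGetD v (i : Int) 0) else vr) acc
    = acc ++ List.replicate (v.count (v.getD i 0) - 1) (v.getD i 0) := by
  rw [PySem.List.pyRange_zero_natCast, List.foldl_map, PySem.List.pyGetD_natCast]
  have h1 : ∀ (vr : List Int) (j : Nat), j ∈ List.range v.length →
      (if v.getD i 0 = PySem.List.pyGetD v (j : Int) 0 ∧ (i : Int) ≠ (j : Int)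
        then add_apos_utimo vr (v.getD i 0) else vr)
      = (if v.getD i 0 = v.getD j 0 ∧ i ≠ j then vr ++ [v.getD i 0] else vr) := by
    intro vr j _
    rw [PySem.List.pyGetD_natCast, add_apos_eq]
    simp [Ne]
  rw [PySem.List.foldl_congr_mem (List.range v.length)
    (fun vr j => if v.getD i 0 = PySem.List.pyGetD v (j : Int) 0 ∧ (i : Int) ≠ (j : Int)
      then add_apos_utimo vr (v.getD i 0) else vr)
    (fun vr j => if v.getD i 0 = v.getD j 0 ∧ i ≠ j then vr ++ [v.getD i 0] else vr) acc h1]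
  rw [PySem.List.foldl_append_ite (p := fun j => v.getD i 0 = v.getD j 0 ∧ i ≠ j)
    (f := fun _ => v.getD i 0)]
  rw [List.map_const', ← List.countP_eq_length_filter, countP_partners v i hi]

theorem A_eq_canonical (v : List Int) :
    elementos_repetidos v
      = v.foldl (fun acc x => acc ++ List.replicate (v.count x - 1) x) [] := by
  unfold elementos_repetidos
  rw [PySem.List.pyRange_zero_natCast, List.foldl_map]
  have h : ∀ (acc : List Int) (i : Nat), i ∈ List.range v.length →
      ((List.range v.length).map (fun k => (Nat.cast k : Int))).foldl
        (fun vr j => if PySem.List.pyGetD v (i : Int) 0 = PySem.List.pyGetD v j 0 ∧ (i : Int) ≠ j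
          then add_apos_utimo vr (PySem.List.pyGetD v (i : Int) 0) else vr) acc
      = acc ++ List.replicate (v.count (v.getD i 0) - 1) (v.getD i 0) := by
    intro acc i hmem
    rw [← PySem.List.pyRange_zero_natCast]
    exact inner_eq v i (List.mem_range.mp hmem) acc
  rw [PySem.List.foldl_congr_mem (List.range v.length)
    (fun acc i => ((List.range v.length).map (fun k => (Nat.cast k : Int))).foldl
      (fun vr j => if PySem.List.pyGetD v (i : Int) 0 = PySem.List.pyGetD v j 0 ∧ (i : Int) ≠ j
        then add_apos_utimo vr (PySem.List.pyGetD v (i : Int) 0) else vr) acc)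
    (fun acc i => acc ++ List.replicate (v.count (v.getD i 0) - 1) (v.getD i 0)) [] h]
  exact foldl_range_getD v (fun acc x => acc ++ List.replicate (v.count x - 1) x) []

theorem B_eq_canonical (v : List Int) :
    elementos_repetidos_alt v
      = v.foldl (fun acc x => acc ++ List.replicate (v.count x - 1) x) [] := by
  unfold elementos_repetidos_alt
  rw [PySem.Dict.foldl_insert_getD_add_one_eq_counter]
  apply PySem.List.foldl_congr_mem
  intro acc x hx
  rw [PySem.Dict.getD_counter]
  have hpos : (0:Int) < ((v.count x : Nat) : Int) := by
    exact_mod_cast List.count_pos_iff.mpr hx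
  congr 2
  omega

-- ===== VERDICT (by name: the statement is the Claim_ definition above) =====
theorem elementos_repetidos_spec : Claim_equal_elementos_repetidos := by
  intro v _
  unfold Spec_elementos_repetidos
  rw [A_eq_canonical, B_eq_canonical]
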